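-- pv_equiv track=rewrite | github.com/Checkmk/checkmk | packages/cmk-werks/cmk/werks/parse.py | parse_werk_v1
-- ===== SOURCE A (Python) =====
-- from typing import NamedTuple
--
-- class WerkV1ParseResult(NamedTuple):
--     metadata: dict[str, str]
--     description: list[str]
--
-- def parse_werk_v1(content: str, werk_id: int) -> WerkV1ParseResult:
--     """
--     parse werk v1 but do not validate, or transform description
--     """
--     werk: dict[str, str] = {
--         # older werks don't specify compatible or edition
--         "compatible": "compat",
--         "edition": "cre",
--         "id": str(werk_id),
--     }
--     description = []
--     in_header = True
--     for line in content.split("\n"):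
--         try:
--             if in_header and not line.strip():
--                 in_header = False
--             elif in_header:
--                 key, text = line.split(":", 1)
--                 try:
--                     value = str(int(text.strip()))
--                 except ValueError:
--                     value = text.strip()
--                 field = key.lower()
--                 werk[field] = value
--             else:
--                 description.append(line)
--         except Exception as e:
--             raise RuntimeError(f"Can not parse line {line!r} of werk {werk_id}") from e
--
--     while description and description[-1] == "":
--         description.pop()
--
--     return WerkV1ParseResult(werk, description)
-- ===== SOURCE B (Python) =====
-- from typing import NamedTuple
--
-- class WerkV1ParseResult(NamedTuple):
--     metadata: dict[str, str]
--     description: list[str]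
--
-- def _rtrim(xs: list[str]) -> list[str]:
--     if xs and xs[-1] == "":
--         return _rtrim(xs[:-1])
--     return xs
--
-- def parse_werk_v1(content: str, werk_id: int) -> WerkV1ParseResult:
--     lines = content.split("\n")
--     blank = next((i for i, line in enumerate(lines) if not line.strip()), None)
--     header = lines if blank is None else lines[:blank]
--     description = [] if blank is None else lines[blank + 1:]
--     werk = {"compatible": "compat", "edition": "cre", "id": str(werk_id)}
--     for line in header:
--         try:
--             key, text = line.split(":", 1)
--             try:
--                 value = str(int(text.strip()))
--             except ValueError:
--                 value = text.strip()
--             werk[key.lower()] = value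
--         except Exception as e:
--             raise RuntimeError(f"Can not parse line {line!r} of werk {werk_id}") from e
--     return WerkV1ParseResult(werk, _rtrim(description))
-- ===== Notes on version B (the rewrite author's own statement) =====
-- stated objective: simpler
-- what changed: B splits the content into lines once, locates the first strip-blank line, and then parses the header slice and takes the description slice directly, instead of A's single loop threading an in_header flag; the trailing-empty trim is recursive instead of a while/pop loop.
import Mathlib
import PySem

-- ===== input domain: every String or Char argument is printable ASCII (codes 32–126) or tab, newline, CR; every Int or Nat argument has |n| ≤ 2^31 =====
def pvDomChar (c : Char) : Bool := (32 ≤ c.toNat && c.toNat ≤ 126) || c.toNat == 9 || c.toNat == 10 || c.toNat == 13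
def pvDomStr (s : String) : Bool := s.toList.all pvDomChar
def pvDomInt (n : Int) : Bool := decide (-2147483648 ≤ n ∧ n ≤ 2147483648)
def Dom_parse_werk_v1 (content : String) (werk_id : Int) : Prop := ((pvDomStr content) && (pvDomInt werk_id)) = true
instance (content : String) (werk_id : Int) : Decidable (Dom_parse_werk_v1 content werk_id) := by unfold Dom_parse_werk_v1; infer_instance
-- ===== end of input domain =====

-- B parses the same werk header/description by splitting at the first blank line up front
-- (header slice + description slice) instead of A's one loop threading an in_header flag; simpler decomposition, same cost.


-- ===== PORT A =====
-- one iteration of A's `for line in content.split("\n")` loop; state = none once the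
-- RuntimeError has been raised (the werk dict, the description list, the in_header flag)
def pvStepA (st : Option (PySem.Dict String String × List String × Bool)) (line : String) :
    Option (PySem.Dict String String × List String × Bool) :=
  match st with
  | none => none
  | some (werk, description, in_header) =>
    if in_header && (PySem.Str.strip line == "") then
      some (werk, description, false)
    else if in_header then
      -- key, text = line.split(":", 1)  (a 1-element result = ValueError → RuntimeError)
      match PySem.Str.splitMax? line ":" 1 with
      | some [key, text] =>
        let value :=
          match PySem.Int.ofStr? (PySem.Str.strip text) with
          | some n => PySem.Int.toStr n
          | none => PySem.Str.strip text
        some (werk.insert (PySem.Str.lower key) value, description, in_header)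
      | _ => none
    else
      some (werk, description ++ [line], in_header)

-- `while description and description[-1] == "": description.pop()`
def pvPopTrailing (xs : List String) : List String :=
  if h : xs.getLast? = some "" then pvPopTrailing xs.dropLast else xs
termination_by xs.length
decreasing_by
  have hne : xs ≠ [] := by intro hx; subst hx; simp at h
  have := List.length_pos_iff.mpr hne
  simp [List.length_dropLast]; omega

def parse_werk_v1 (content : String) (werk_id : Int) : (List (String × String)) × List String :=
  let werk0 : PySem.Dict String String :=
    PySem.Dict.ofList [("compatible", "compat"), ("edition", "cre"), ("id", PySem.Int.toStr werk_id)]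
  -- content.split("\n"): the separator is non-empty, so split? is always `some`
  let lines := (PySem.Str.split? content "\n").getD []
  match lines.foldl pvStepA (some (werk0, [], true)) with
  | some (werk, description, _) => (werk.items, pvPopTrailing description)
  | none => ([], [])   -- the RuntimeError path (excluded by Pre_)

-- ===== PORT B =====
-- B's per-header-line parse (the try/except body of Source B's loop); none = RuntimeError
def pvParseHeaderLine (werk : PySem.Dict String String) (line : String) :
    Option (PySem.Dict String String) :=
  match PySem.Str.splitMax? line ":" 1 with
  | some [key, text] =>
    let value :=
      match PySem.Int.ofStr? (PySem.Str.strip text) with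
      | some n => PySem.Int.toStr n
      | none => PySem.Str.strip text
    some (werk.insert (PySem.Str.lower key) value)
  | _ => none

-- Source B's recursive _rtrim
def pvRtrim (xs : List String) : List String :=
  if h : xs.getLast? = some "" then pvRtrim xs.dropLast else xs
termination_by xs.length
decreasing_by
  have hne : xs ≠ [] := by intro hx; subst hx; simp at h
  have := List.length_pos_iff.mpr hne
  simp [List.length_dropLast]; omega

def parse_werk_v1_alt (content : String) (werk_id : Int) : (List (String × String)) × List String :=
  let lines := (PySem.Str.split? content "\n").getD []
  let blank := lines.findIdx? (fun l => PySem.Str.strip l == "")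
  let header := match blank with | none => lines | some i => lines.take i
  let description := match blank with | none => ([] : List String) | some i => lines.drop (i + 1)
  let werk0 : PySem.Dict String String :=
    PySem.Dict.ofList [("compatible", "compat"), ("edition", "cre"), ("id", PySem.Int.toStr werk_id)]
  match header.foldl (fun ow line => ow.bind (fun w => pvParseHeaderLine w line)) (some werk0) with
  | some werk => (werk.items, pvRtrim description)
  | none => ([], [])   -- the RuntimeError path (excluded by Pre_)

-- ===== PRECONDITION & SPEC =====
-- the header lines of the content: everything before the first line that is blank after strip()
def pvHeaderLines (content : String) : List String :=
  let lines := (PySem.Str.split? content "\n").getD []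
  match lines.findIdx? (fun l => PySem.Str.strip l == "") with
  | none => lines
  | some i => lines.take i

-- Pre_ excludes exactly the inputs where A raises RuntimeError: a header line without a ':'
def Pre_parse_werk_v1 (content : String) (werk_id : Int) : Prop :=
  ∀ line ∈ pvHeaderLines content, line.toList.contains ':' = true
instance (content : String) (werk_id : Int) : Decidable (Pre_parse_werk_v1 content werk_id) := by
  unfold Pre_parse_werk_v1; infer_instance

def pvWitness_parse_werk_v1 : String × Int :=
  ("Title: fix thing\nLevel: 2\n\nSome description.\n", 123)

def Spec_parse_werk_v1 (content : String) (werk_id : Int) (out : (List (String × String)) × List String) : Prop := out = parse_werk_v1_alt content werk_id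
instance (content : String) (werk_id : Int) (out : (List (String × String)) × List String) : Decidable (Spec_parse_werk_v1 content werk_id out) := by unfold Spec_parse_werk_v1; infer_instance

-- ===== CLAIM (what is proved, stated in full; the proofs are below) =====
def Claim_equal_parse_werk_v1 : Prop := ∀ (content : String) (werk_id : Int), Dom_parse_werk_v1 content werk_id → Pre_parse_werk_v1 content werk_id → Spec_parse_werk_v1 content werk_id (parse_werk_v1 content werk_id)

-- ===== LEMMAS AND PROOFS =====

theorem pvWitness_ok :
    Dom_parse_werk_v1 pvWitness_parse_werk_v1.1 pvWitness_parse_werk_v1.2 ∧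
    Pre_parse_werk_v1 pvWitness_parse_werk_v1.1 pvWitness_parse_werk_v1.2 := by
  decide

-- A's loop once the RuntimeError has fired stays failed
theorem foldA_none (ls : List String) : ls.foldl pvStepA none = none := by
  induction ls with
  | nil => rfl
  | cons l ls ih => simpa [pvStepA] using ih

-- A's loop after the blank line only appends to description
theorem foldA_false (ls : List String) (w : PySem.Dict String String) (d : List String) :
    ls.foldl pvStepA (some (w, d, false)) = some (w, d ++ ls, false) := by
  induction ls generalizing d with
  | nil => simp
  | cons l ls ih => simpa [pvStepA] using ih (d ++ [l])

-- B's header fold once failed stays failed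
theorem foldB_none (ls : List String) :
    ls.foldl (fun ow line => ow.bind (fun w => pvParseHeaderLine w line)) none = none := by
  induction ls with
  | nil => rfl
  | cons l ls ih => simpa using ih

-- one A-step in header mode, on a non-blank line, is B's per-line parse
theorem stepA_header (w : PySem.Dict String String) (d : List String) (line : String)
    (hb : (PySem.Str.strip line == "") = false) :
    pvStepA (some (w, d, true)) line
      = (pvParseHeaderLine w line).map (fun w' => (w', d, true)) := by
  simp only [pvStepA, pvParseHeaderLine, hb, Bool.and_false]
  cases hsp : PySem.Str.splitMax? line ":" 1 with
  | none => rfl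
  | some parts =>
    match parts with
    | [] => rfl
    | [k] => rfl
    | [k, t] => rfl
    | k :: t :: u :: rest => rfl

-- the key invariant: A's flagged loop = B's split-at-first-blank decomposition
theorem foldA_true (ls : List String) (w : PySem.Dict String String) (d : List String) :
    ls.foldl pvStepA (some (w, d, true)) =
      match ls.findIdx? (fun l => PySem.Str.strip l == "") with
      | none =>
          (ls.foldl (fun ow line => ow.bind (fun w => pvParseHeaderLine w line)) (some w)).map
            (fun w' => (w', d, true))
      | some i =>
          ((ls.take i).foldl (fun ow line => ow.bind (fun w => pvParseHeaderLine w line)) (some w)).map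
            (fun w' => (w', d ++ ls.drop (i + 1), false)) := by
  induction ls generalizing w with
  | nil => simp
  | cons l ls ih =>
    by_cases hb : (PySem.Str.strip l == "") = true
    · have h0 : (l :: ls).findIdx? (fun l => PySem.Str.strip l == "") = some 0 := by
        simp [List.findIdx?_cons, hb]
      have hstep : pvStepA (some (w, d, true)) l = some (w, d, false) := by
        simp [pvStepA, hb]
      simp only [List.foldl_cons, hstep, h0, foldA_false, List.take_zero, List.foldl_nil,
        Option.map_some, List.drop_succ_cons, List.drop_zero]
    · have hb' : (PySem.Str.strip l == "") = false := by simpa using hb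
      have hstep := stepA_header w d l hb'
      cases hp : pvParseHeaderLine w l with
      | none =>
        simp only [List.foldl_cons, hstep, hp, Option.map_none, foldA_none,
          List.findIdx?_cons, hb']
        cases hf : ls.findIdx? (fun l => PySem.Str.strip l == "") with
        | none => simp [hp, foldB_none]
        | some i => simp [hp, foldB_none]
      | some w' =>
        simp only [List.foldl_cons, hstep, hp, Option.map_some]
        rw [ih w']
        simp only [List.findIdx?_cons, hb']
        cases hf : ls.findIdx? (fun l => PySem.Str.strip l == "") with
        | none => simp [hp]
        | some i => simp [hp]

-- A's while/pop trim and Source B's recursive _rtrim compute the same list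
theorem popTrailing_eq_rtrim (xs : List String) : pvPopTrailing xs = pvRtrim xs := by
  induction xs using pvPopTrailing.induct with
  | case1 xs h ih => rw [pvPopTrailing, pvRtrim]; simp only [h, dif_pos]; exact ih
  | case2 xs h => rw [pvPopTrailing, pvRtrim]; simp only [h, dif_neg, not_false_iff]

-- ===== VERDICT (by name: the statement is the Claim_ definition above) =====
theorem parse_werk_v1_spec : Claim_equal_parse_werk_v1 := by
  unfold Claim_equal_parse_werk_v1
  intro content werk_id _ _
  unfold Spec_parse_werk_v1 parse_werk_v1 parse_werk_v1_alt
  simp only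
  rw [foldA_true]
  cases hf : ((PySem.Str.split? content "\n").getD []).findIdx? (fun l => PySem.Str.strip l == "") with
  | none =>
    cases hh : ((PySem.Str.split? content "\n").getD []).foldl
        (fun ow line => ow.bind (fun w => pvParseHeaderLine w line))
        (some (PySem.Dict.ofList [("compatible", "compat"), ("edition", "cre"), ("id", PySem.Int.toStr werk_id)])) with
    | none => simp
    | some w => simp [popTrailing_eq_rtrim]
  | some i =>
    cases hh : (((PySem.Str.split? content "\n").getD []).take i).foldl
        (fun ow line => ow.bind (fun w => pvParseHeaderLine w line))
        (some (PySem.Dict.ofList [("compatible", "compat"), ("edition", "cre"), ("id", PySem.Int.toStr werk_id)])) with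
    | none => simp [hh]
    | some w => simp [hh, popTrailing_eq_rtrim]
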